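-- pv_equiv track=rewrite | github.com/vixhh14/kmt-workflow-tracker | backend/analyze_all_sheets.py | identify_sheet_type
-- ===== SOURCE A (Python) =====
-- def identify_sheet_type(headers):
--     """Identify what type of data this sheet contains"""
--     headers_lower = [h.lower() for h in headers]
--
--     if 'task_id' in headers_lower:
--         return "TASKS (General Tasks)"
--     elif 'filing_task_id' in headers_lower:
--         return "FILING TASKS"
--     elif 'fabrication_task_id' in headers_lower:
--         return "FABRICATION TASKS"
--     elif 'project_id' in headers_lower and 'project_name' in headers_lower:
--         return "PROJECTS"
--     elif 'user_id' in headers_lower and 'username' in headers_lower: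
--         return "USERS"
--     elif 'machine_id' in headers_lower and 'machine_name' in headers_lower:
--         return "MACHINES"
--     elif 'unit_id' in headers_lower:
--         return "UNITS"
--     elif 'attendance_id' in headers_lower:
--         return "ATTENDANCE"
--     elif 'category_id' in headers_lower and 'category_name' in headers_lower:
--         return "MACHINE CATEGORIES"
--     else:
--         return "UNKNOWN / OTHER"
-- ===== SOURCE B (Python) =====
-- # Bit-flag single pass: one scan over headers sets a bitmask of recognized
-- # sentinel keys; classification is then decided from the mask alone.
-- KEY_BIT = {
--     'task_id': 1, 'filing_task_id': 2, 'fabrication_task_id': 4,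
--     'project_id': 8, 'project_name': 16, 'user_id': 32, 'username': 64,
--     'machine_id': 128, 'machine_name': 256, 'unit_id': 512,
--     'attendance_id': 1024, 'category_id': 2048, 'category_name': 4096,
-- }
-- MASK_RULES = [
--     (1, "TASKS (General Tasks)"),
--     (2, "FILING TASKS"),
--     (4, "FABRICATION TASKS"),
--     (8 | 16, "PROJECTS"),
--     (32 | 64, "USERS"),
--     (128 | 256, "MACHINES"),
--     (512, "UNITS"),
--     (1024, "ATTENDANCE"),
--     (2048 | 4096, "MACHINE CATEGORIES"),
-- ]
--
--
-- def identify_sheet_type(headers):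
--     """Identify what type of data this sheet contains"""
--     seen = 0
--     for h in headers:
--         seen |= KEY_BIT.get(h.lower(), 0)
--     for required, label in MASK_RULES:
--         if seen & required == required:
--             return label
--     return "UNKNOWN / OTHER"
-- ===== Notes on version B (the rewrite author's own statement) =====
-- stated objective: faster
-- what changed: A scans the lowered header list up to 13 times, once per membership test in its if/elif chain; B makes one pass over the headers OR-ing bit flags of recognized sentinel keys into a bitmask, then classifies purely from the mask with bitwise AND against per-rule required masks, so the repeated list scans disappear.
import Mathlib
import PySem

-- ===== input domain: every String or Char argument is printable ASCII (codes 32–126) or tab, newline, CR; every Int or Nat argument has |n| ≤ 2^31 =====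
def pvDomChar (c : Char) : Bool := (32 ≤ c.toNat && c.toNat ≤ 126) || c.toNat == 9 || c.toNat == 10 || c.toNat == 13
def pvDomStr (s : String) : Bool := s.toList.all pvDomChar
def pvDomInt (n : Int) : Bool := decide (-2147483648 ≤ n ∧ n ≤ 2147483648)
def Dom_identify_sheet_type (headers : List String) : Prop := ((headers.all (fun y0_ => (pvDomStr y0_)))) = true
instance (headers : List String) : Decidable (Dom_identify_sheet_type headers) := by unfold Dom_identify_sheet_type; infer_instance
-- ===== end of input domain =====

-- B replaces A's repeated membership scans of the lowered header list (one per
-- branch of the if/elif chain) by ONE pass over the headers OR-ing bit flags of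
-- recognized sentinel keys into a bitmask, then classifies from the mask alone
-- via bitwise AND against per-rule required masks (one pass instead of up to 13 scans).


-- ===== PORT A =====
def identify_sheet_type (headers : List String) : String :=
  let headers_lower := headers.map PySem.Str.lower
  if headers_lower.contains "task_id" then "TASKS (General Tasks)"
  else if headers_lower.contains "filing_task_id" then "FILING TASKS"
  else if headers_lower.contains "fabrication_task_id" then "FABRICATION TASKS"
  else if headers_lower.contains "project_id" && headers_lower.contains "project_name" then "PROJECTS"
  else if headers_lower.contains "user_id" && headers_lower.contains "username" then "USERS"
  else if headers_lower.contains "machine_id" && headers_lower.contains "machine_name" then "MACHINES"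
  else if headers_lower.contains "unit_id" then "UNITS"
  else if headers_lower.contains "attendance_id" then "ATTENDANCE"
  else if headers_lower.contains "category_id" && headers_lower.contains "category_name" then "MACHINE CATEGORIES"
  else "UNKNOWN / OTHER"

-- ===== PORT B =====
-- the KEY_BIT dict literal (distinct literal keys, so Dict.mk is its value)
def pvKeyBit : PySem.Dict String Nat :=
  PySem.Dict.mk
    [ ("task_id", 1), ("filing_task_id", 2), ("fabrication_task_id", 4),
      ("project_id", 8), ("project_name", 16), ("user_id", 32), ("username", 64),
      ("machine_id", 128), ("machine_name", 256), ("unit_id", 512),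
      ("attendance_id", 1024), ("category_id", 2048), ("category_name", 4096) ]

def pvMaskRules : List (Nat × String) :=
  [ (1, "TASKS (General Tasks)"),
    (2, "FILING TASKS"),
    (4, "FABRICATION TASKS"),
    (8 ||| 16, "PROJECTS"),
    (32 ||| 64, "USERS"),
    (128 ||| 256, "MACHINES"),
    (512, "UNITS"),
    (1024, "ATTENDANCE"),
    (2048 ||| 4096, "MACHINE CATEGORIES") ]

def identify_sheet_type_alt (headers : List String) : String :=
  let seen := headers.foldl (fun a h => a ||| PySem.Dict.getD pvKeyBit (PySem.Str.lower h) 0) 0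
  match pvMaskRules.find? (fun r => seen &&& r.1 == r.1) with
  | some r => r.2
  | none => "UNKNOWN / OTHER"

-- ===== PRECONDITION & SPEC =====
def Spec_identify_sheet_type (headers : List String) (out : String) : Prop := out = identify_sheet_type_alt headers
instance (headers : List String) (out : String) : Decidable (Spec_identify_sheet_type headers out) := by unfold Spec_identify_sheet_type; infer_instance

-- ===== CLAIM (what is proved, stated in full; the proofs are below) =====
def Claim_equal_identify_sheet_type : Prop := ∀ (headers : List String), Dom_identify_sheet_type headers → Spec_identify_sheet_type headers (identify_sheet_type headers)

-- ===== LEMMAS AND PROOFS =====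

-- the per-header bit contribution of B's loop body
def pvBitOf (h : String) : Nat := PySem.Dict.getD pvKeyBit (PySem.Str.lower h) 0

-- bitmask normal form: the OR of the 13 sentinel flag bits
def pvMask (c0 c1 c2 c3 c4 c5 c6 c7 c8 c9 c10 c11 c12 : Bool) : Nat :=
  (if c0 then 1 else 0) ||| (if c1 then 2 else 0) ||| (if c2 then 4 else 0) |||
  (if c3 then 8 else 0) ||| (if c4 then 16 else 0) ||| (if c5 then 32 else 0) |||
  (if c6 then 64 else 0) ||| (if c7 then 128 else 0) ||| (if c8 then 256 else 0) |||
  (if c9 then 512 else 0) ||| (if c10 then 1024 else 0) ||| (if c11 then 2048 else 0) |||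
  (if c12 then 4096 else 0)

theorem get?_mk_nilN (s : String) : (PySem.Dict.mk ([] : List (String × Nat))).get? s = none := rfl

theorem getD_keyBit (s : String) : PySem.Dict.getD pvKeyBit s 0 =
    if "task_id" == s then 1 else
    if "filing_task_id" == s then 2 else
    if "fabrication_task_id" == s then 4 else
    if "project_id" == s then 8 else
    if "project_name" == s then 16 else
    if "user_id" == s then 32 else
    if "username" == s then 64 else
    if "machine_id" == s then 128 else
    if "machine_name" == s then 256 else
    if "unit_id" == s then 512 else
    if "attendance_id" == s then 1024 else
    if "category_id" == s then 2048 else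
    if "category_name" == s then 4096 else
    0 := by
  rw [PySem.Dict.getD_eq_get?_getD]
  show (PySem.Dict.get? (PySem.Dict.mk _) s).getD 0 = _
  rw [PySem.Dict.get?_mk_cons,
      PySem.Dict.get?_mk_cons,
      PySem.Dict.get?_mk_cons,
      PySem.Dict.get?_mk_cons,
      PySem.Dict.get?_mk_cons,
      PySem.Dict.get?_mk_cons,
      PySem.Dict.get?_mk_cons,
      PySem.Dict.get?_mk_cons,
      PySem.Dict.get?_mk_cons,
      PySem.Dict.get?_mk_cons,
      PySem.Dict.get?_mk_cons,
      PySem.Dict.get?_mk_cons,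
      PySem.Dict.get?_mk_cons, get?_mk_nilN]
  rw [apply_ite (fun o : Option Nat => o.getD 0),
      apply_ite (fun o : Option Nat => o.getD 0),
      apply_ite (fun o : Option Nat => o.getD 0),
      apply_ite (fun o : Option Nat => o.getD 0),
      apply_ite (fun o : Option Nat => o.getD 0),
      apply_ite (fun o : Option Nat => o.getD 0),
      apply_ite (fun o : Option Nat => o.getD 0),
      apply_ite (fun o : Option Nat => o.getD 0),
      apply_ite (fun o : Option Nat => o.getD 0),
      apply_ite (fun o : Option Nat => o.getD 0),
      apply_ite (fun o : Option Nat => o.getD 0),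
      apply_ite (fun o : Option Nat => o.getD 0),
      apply_ite (fun o : Option Nat => o.getD 0)]
  rfl

theorem or_mask_0 : ∀ c0 c1 c2 c3 c4 c5 c6 c7 c8 c9 c10 c11 c12 : Bool,
    1 ||| pvMask c0 c1 c2 c3 c4 c5 c6 c7 c8 c9 c10 c11 c12 = pvMask true c1 c2 c3 c4 c5 c6 c7 c8 c9 c10 c11 c12 := by decide
theorem or_mask_1 : ∀ c0 c1 c2 c3 c4 c5 c6 c7 c8 c9 c10 c11 c12 : Bool,
    2 ||| pvMask c0 c1 c2 c3 c4 c5 c6 c7 c8 c9 c10 c11 c12 = pvMask c0 true c2 c3 c4 c5 c6 c7 c8 c9 c10 c11 c12 := by decide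
theorem or_mask_2 : ∀ c0 c1 c2 c3 c4 c5 c6 c7 c8 c9 c10 c11 c12 : Bool,
    4 ||| pvMask c0 c1 c2 c3 c4 c5 c6 c7 c8 c9 c10 c11 c12 = pvMask c0 c1 true c3 c4 c5 c6 c7 c8 c9 c10 c11 c12 := by decide
theorem or_mask_3 : ∀ c0 c1 c2 c3 c4 c5 c6 c7 c8 c9 c10 c11 c12 : Bool,
    8 ||| pvMask c0 c1 c2 c3 c4 c5 c6 c7 c8 c9 c10 c11 c12 = pvMask c0 c1 c2 true c4 c5 c6 c7 c8 c9 c10 c11 c12 := by decide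
theorem or_mask_4 : ∀ c0 c1 c2 c3 c4 c5 c6 c7 c8 c9 c10 c11 c12 : Bool,
    16 ||| pvMask c0 c1 c2 c3 c4 c5 c6 c7 c8 c9 c10 c11 c12 = pvMask c0 c1 c2 c3 true c5 c6 c7 c8 c9 c10 c11 c12 := by decide
theorem or_mask_5 : ∀ c0 c1 c2 c3 c4 c5 c6 c7 c8 c9 c10 c11 c12 : Bool,
    32 ||| pvMask c0 c1 c2 c3 c4 c5 c6 c7 c8 c9 c10 c11 c12 = pvMask c0 c1 c2 c3 c4 true c6 c7 c8 c9 c10 c11 c12 := by decide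
theorem or_mask_6 : ∀ c0 c1 c2 c3 c4 c5 c6 c7 c8 c9 c10 c11 c12 : Bool,
    64 ||| pvMask c0 c1 c2 c3 c4 c5 c6 c7 c8 c9 c10 c11 c12 = pvMask c0 c1 c2 c3 c4 c5 true c7 c8 c9 c10 c11 c12 := by decide
theorem or_mask_7 : ∀ c0 c1 c2 c3 c4 c5 c6 c7 c8 c9 c10 c11 c12 : Bool,
    128 ||| pvMask c0 c1 c2 c3 c4 c5 c6 c7 c8 c9 c10 c11 c12 = pvMask c0 c1 c2 c3 c4 c5 c6 true c8 c9 c10 c11 c12 := by decide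
theorem or_mask_8 : ∀ c0 c1 c2 c3 c4 c5 c6 c7 c8 c9 c10 c11 c12 : Bool,
    256 ||| pvMask c0 c1 c2 c3 c4 c5 c6 c7 c8 c9 c10 c11 c12 = pvMask c0 c1 c2 c3 c4 c5 c6 c7 true c9 c10 c11 c12 := by decide
theorem or_mask_9 : ∀ c0 c1 c2 c3 c4 c5 c6 c7 c8 c9 c10 c11 c12 : Bool,
    512 ||| pvMask c0 c1 c2 c3 c4 c5 c6 c7 c8 c9 c10 c11 c12 = pvMask c0 c1 c2 c3 c4 c5 c6 c7 c8 true c10 c11 c12 := by decide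
theorem or_mask_10 : ∀ c0 c1 c2 c3 c4 c5 c6 c7 c8 c9 c10 c11 c12 : Bool,
    1024 ||| pvMask c0 c1 c2 c3 c4 c5 c6 c7 c8 c9 c10 c11 c12 = pvMask c0 c1 c2 c3 c4 c5 c6 c7 c8 c9 true c11 c12 := by decide
theorem or_mask_11 : ∀ c0 c1 c2 c3 c4 c5 c6 c7 c8 c9 c10 c11 c12 : Bool,
    2048 ||| pvMask c0 c1 c2 c3 c4 c5 c6 c7 c8 c9 c10 c11 c12 = pvMask c0 c1 c2 c3 c4 c5 c6 c7 c8 c9 c10 true c12 := by decide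
theorem or_mask_12 : ∀ c0 c1 c2 c3 c4 c5 c6 c7 c8 c9 c10 c11 c12 : Bool,
    4096 ||| pvMask c0 c1 c2 c3 c4 c5 c6 c7 c8 c9 c10 c11 c12 = pvMask c0 c1 c2 c3 c4 c5 c6 c7 c8 c9 c10 c11 true := by decide

theorem foldl_or_init (l : List String) (acc : Nat) :
    l.foldl (fun a h => a ||| pvBitOf h) acc = acc ||| l.foldl (fun a h => a ||| pvBitOf h) 0 := by
  induction l generalizing acc with
  | nil => simp
  | cons h t ih =>
    simp only [List.foldl_cons]
    rw [ih (acc ||| pvBitOf h), ih (0 ||| pvBitOf h), Nat.zero_or, Nat.or_assoc]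

theorem seen_eq_mask (headers : List String) :
    headers.foldl (fun a h => a ||| pvBitOf h) 0 =
      pvMask
             (headers.any (fun h => PySem.Str.lower h == "task_id"))
             (headers.any (fun h => PySem.Str.lower h == "filing_task_id"))
             (headers.any (fun h => PySem.Str.lower h == "fabrication_task_id"))
             (headers.any (fun h => PySem.Str.lower h == "project_id"))
             (headers.any (fun h => PySem.Str.lower h == "project_name"))
             (headers.any (fun h => PySem.Str.lower h == "user_id"))
             (headers.any (fun h => PySem.Str.lower h == "username"))
             (headers.any (fun h => PySem.Str.lower h == "machine_id"))
             (headers.any (fun h => PySem.Str.lower h == "machine_name"))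
             (headers.any (fun h => PySem.Str.lower h == "unit_id"))
             (headers.any (fun h => PySem.Str.lower h == "attendance_id"))
             (headers.any (fun h => PySem.Str.lower h == "category_id"))
             (headers.any (fun h => PySem.Str.lower h == "category_name")) := by
  induction headers with
  | nil => decide
  | cons h t ih =>
    simp only [List.foldl_cons, List.any_cons, Nat.zero_or]
    rw [foldl_or_init, ih]
    simp only [pvBitOf]
    rw [getD_keyBit]
    by_cases h0 : PySem.Str.lower h = "task_id"
    · rw [h0]
      simp
      apply or_mask_0
    · by_cases h1 : PySem.Str.lower h = "filing_task_id"
      · rw [h1]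
        simp
        apply or_mask_1
      · by_cases h2 : PySem.Str.lower h = "fabrication_task_id"
        · rw [h2]
          simp
          apply or_mask_2
        · by_cases h3 : PySem.Str.lower h = "project_id"
          · rw [h3]
            simp
            apply or_mask_3
          · by_cases h4 : PySem.Str.lower h = "project_name"
            · rw [h4]
              simp
              apply or_mask_4
            · by_cases h5 : PySem.Str.lower h = "user_id"
              · rw [h5]
                simp
                apply or_mask_5
              · by_cases h6 : PySem.Str.lower h = "username"
                · rw [h6]
                  simp
                  apply or_mask_6
                · by_cases h7 : PySem.Str.lower h = "machine_id"
                  · rw [h7]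
                    simp
                    apply or_mask_7
                  · by_cases h8 : PySem.Str.lower h = "machine_name"
                    · rw [h8]
                      simp
                      apply or_mask_8
                    · by_cases h9 : PySem.Str.lower h = "unit_id"
                      · rw [h9]
                        simp
                        apply or_mask_9
                      · by_cases h10 : PySem.Str.lower h = "attendance_id"
                        · rw [h10]
                          simp
                          apply or_mask_10
                        · by_cases h11 : PySem.Str.lower h = "category_id"
                          · rw [h11]
                            simp
                            apply or_mask_11
                          · by_cases h12 : PySem.Str.lower h = "category_name"
                            · rw [h12]
                              simp
                              apply or_mask_12
                            · have e0 : (PySem.Str.lower h == "task_id") = false := beq_eq_false_iff_ne.mpr h0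
                              have f0 : ("task_id" == PySem.Str.lower h) = false := beq_eq_false_iff_ne.mpr (Ne.symm h0)
                              have e1 : (PySem.Str.lower h == "filing_task_id") = false := beq_eq_false_iff_ne.mpr h1
                              have f1 : ("filing_task_id" == PySem.Str.lower h) = false := beq_eq_false_iff_ne.mpr (Ne.symm h1)
                              have e2 : (PySem.Str.lower h == "fabrication_task_id") = false := beq_eq_false_iff_ne.mpr h2
                              have f2 : ("fabrication_task_id" == PySem.Str.lower h) = false := beq_eq_false_iff_ne.mpr (Ne.symm h2)
                              have e3 : (PySem.Str.lower h == "project_id") = false := beq_eq_false_iff_ne.mpr h3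
                              have f3 : ("project_id" == PySem.Str.lower h) = false := beq_eq_false_iff_ne.mpr (Ne.symm h3)
                              have e4 : (PySem.Str.lower h == "project_name") = false := beq_eq_false_iff_ne.mpr h4
                              have f4 : ("project_name" == PySem.Str.lower h) = false := beq_eq_false_iff_ne.mpr (Ne.symm h4)
                              have e5 : (PySem.Str.lower h == "user_id") = false := beq_eq_false_iff_ne.mpr h5
                              have f5 : ("user_id" == PySem.Str.lower h) = false := beq_eq_false_iff_ne.mpr (Ne.symm h5)
                              have e6 : (PySem.Str.lower h == "username") = false := beq_eq_false_iff_ne.mpr h6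
                              have f6 : ("username" == PySem.Str.lower h) = false := beq_eq_false_iff_ne.mpr (Ne.symm h6)
                              have e7 : (PySem.Str.lower h == "machine_id") = false := beq_eq_false_iff_ne.mpr h7
                              have f7 : ("machine_id" == PySem.Str.lower h) = false := beq_eq_false_iff_ne.mpr (Ne.symm h7)
                              have e8 : (PySem.Str.lower h == "machine_name") = false := beq_eq_false_iff_ne.mpr h8
                              have f8 : ("machine_name" == PySem.Str.lower h) = false := beq_eq_false_iff_ne.mpr (Ne.symm h8)
                              have e9 : (PySem.Str.lower h == "unit_id") = false := beq_eq_false_iff_ne.mpr h9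
                              have f9 : ("unit_id" == PySem.Str.lower h) = false := beq_eq_false_iff_ne.mpr (Ne.symm h9)
                              have e10 : (PySem.Str.lower h == "attendance_id") = false := beq_eq_false_iff_ne.mpr h10
                              have f10 : ("attendance_id" == PySem.Str.lower h) = false := beq_eq_false_iff_ne.mpr (Ne.symm h10)
                              have e11 : (PySem.Str.lower h == "category_id") = false := beq_eq_false_iff_ne.mpr h11
                              have f11 : ("category_id" == PySem.Str.lower h) = false := beq_eq_false_iff_ne.mpr (Ne.symm h11)
                              have e12 : (PySem.Str.lower h == "category_name") = false := beq_eq_false_iff_ne.mpr h12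
                              have f12 : ("category_name" == PySem.Str.lower h) = false := beq_eq_false_iff_ne.mpr (Ne.symm h12)
                              simp [e0, f0, e1, f1, e2, f2, e3, f3, e4, f4, e5, f5, e6, f6, e7, f7, e8, f8, e9, f9, e10, f10, e11, f11, e12, f12]

theorem beq_comm_str (a b : String) : (a == b) = (b == a) := by
  rw [Bool.eq_iff_iff, beq_iff_eq, beq_iff_eq]; exact eq_comm

theorem contains_map_lower (headers : List String) (k : String) :
    (headers.map PySem.Str.lower).contains k = headers.any (fun h => PySem.Str.lower h == k) := by
  induction headers with
  | nil => rfl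
  | cons h t ih => simp only [List.map_cons, List.contains_cons, List.any_cons, ih, beq_comm_str k]

-- ===== VERDICT (by name: the statement is the Claim_ definition above) =====
theorem identify_sheet_type_spec : Claim_equal_identify_sheet_type := by
  intro headers _
  unfold Spec_identify_sheet_type identify_sheet_type identify_sheet_type_alt
  simp only [contains_map_lower]
  rw [show (fun (a : Nat) (h : String) => a ||| PySem.Dict.getD pvKeyBit (PySem.Str.lower h) 0)
        = (fun a h => a ||| pvBitOf h) from rfl, seen_eq_mask]
  generalize headers.any (fun h => PySem.Str.lower h == "task_id") = a0
  generalize headers.any (fun h => PySem.Str.lower h == "filing_task_id") = a1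
  generalize headers.any (fun h => PySem.Str.lower h == "fabrication_task_id") = a2
  generalize headers.any (fun h => PySem.Str.lower h == "project_id") = a3
  generalize headers.any (fun h => PySem.Str.lower h == "project_name") = a4
  generalize headers.any (fun h => PySem.Str.lower h == "user_id") = a5
  generalize headers.any (fun h => PySem.Str.lower h == "username") = a6
  generalize headers.any (fun h => PySem.Str.lower h == "machine_id") = a7
  generalize headers.any (fun h => PySem.Str.lower h == "machine_name") = a8
  generalize headers.any (fun h => PySem.Str.lower h == "unit_id") = a9
  generalize headers.any (fun h => PySem.Str.lower h == "attendance_id") = a10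
  generalize headers.any (fun h => PySem.Str.lower h == "category_id") = a11
  generalize headers.any (fun h => PySem.Str.lower h == "category_name") = a12
  revert a0 a1 a2 a3 a4 a5 a6 a7 a8 a9 a10 a11 a12
  decide
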